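-- pv_equiv track=rewrite | github.com/JuyeolRyu/CodingTest | 백수/algorithm/etc/상호평가.py | solution
-- ===== SOURCE A (Python) =====
-- def solution(scores):
--     answer = ''
--     for c in range(len(scores[0])):
--         tmp = []
--         for r in range(len(scores)):
--             tmp.append([scores[r][c],r])
--
--         tmp.sort(key=lambda x:x[0])
--         if tmp[0][1] == c and tmp[0][0] != tmp[1][0]:
--             tmp.pop(0)
--         elif tmp[-1][1] == c and tmp[-1][0] != tmp[-2][0]:
--             tmp.pop(-1)
--         s = 0
--         for i in range(len(tmp)):
--             s+=tmp[i][0]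
--         avg = s//len(tmp)
--
--         if avg>=90:
--             answer+='A'
--         elif avg>=80:
--             answer+='B'
--         elif avg>=70:
--             answer+='C'
--         elif avg>=50:
--             answer+='D'
--         else:
--             answer+='F'
--     return answer
-- ===== SOURCE B (Python) =====
-- def solution(scores):
--     n = len(scores)
--     grades = []
--     for c in range(len(scores[0])):
--         col = [scores[r][c] for r in range(n)]
--         s = sum(col)
--         k = n
--         if c < n:
--             me = col[c]
--             if col.count(me) == 1 and (me == min(col) or me == max(col)):
--                 s -= me
--                 k -= 1
--         avg = s // k
--         grades.append('A' if avg >= 90 else 'B' if avg >= 80 else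
--                       'C' if avg >= 70 else 'D' if avg >= 50 else 'F')
--     return ''.join(grades)
-- ===== Notes on version B (the rewrite author's own statement) =====
-- stated objective: faster
-- what changed: Replaces A's per-column sort of (score,row) pairs followed by popping a unique self-given min/max off the sorted list with a single linear pass per column (sum, min, max, count) that decides arithmetically whether to exclude the self-score.
import Mathlib
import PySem

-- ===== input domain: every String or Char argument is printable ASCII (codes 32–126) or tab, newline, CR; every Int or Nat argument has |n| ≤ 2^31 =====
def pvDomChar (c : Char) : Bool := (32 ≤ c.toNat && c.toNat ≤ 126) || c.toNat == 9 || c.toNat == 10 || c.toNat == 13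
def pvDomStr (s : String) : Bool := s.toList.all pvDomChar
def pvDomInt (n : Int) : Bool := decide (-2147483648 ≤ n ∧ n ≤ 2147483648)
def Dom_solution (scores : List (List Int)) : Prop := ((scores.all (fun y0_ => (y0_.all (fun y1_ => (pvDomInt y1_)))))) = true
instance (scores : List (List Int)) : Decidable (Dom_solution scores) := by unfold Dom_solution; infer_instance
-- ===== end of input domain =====

-- B replaces A's per-column sort-and-pop with a single linear pass (sum/min/max/count); objective: faster.


-- ===== PORT A =====
def solution (scores : List (List Int)) : String :=
  (PySem.List.pyRange 0 ((PySem.List.pyGetD scores 0 []).length : Int) 1).foldl (fun answer c =>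
    let tmp : List (Int × Int) :=
      (PySem.List.pyRange 0 (scores.length : Int) 1).foldl
        (fun tmp r => tmp ++ [(PySem.List.pyGetD (PySem.List.pyGetD scores r []) c 0, r)]) []
    let tmp := PySem.List.sorted tmp (fun x => x.1) false
    let tmp :=
      if (PySem.List.pyGetD tmp 0 (0, 0)).2 = c ∧
         (PySem.List.pyGetD tmp 0 (0, 0)).1 ≠ (PySem.List.pyGetD tmp 1 (0, 0)).1 then
        match PySem.List.pop? tmp 0 with      -- tmp.pop(0); none unreachable under Pre_
        | some (_, rest) => rest
        | none => tmp
      else if (PySem.List.pyGetD tmp (-1) (0, 0)).2 = c ∧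
              (PySem.List.pyGetD tmp (-1) (0, 0)).1 ≠ (PySem.List.pyGetD tmp (-2) (0, 0)).1 then
        match PySem.List.pop? tmp (-1) with   -- tmp.pop(-1); none unreachable under Pre_
        | some (_, rest) => rest
        | none => tmp
      else tmp
    let s := (PySem.List.pyRange 0 (tmp.length : Int) 1).foldl
        (fun s i => s + (PySem.List.pyGetD tmp i (0, 0)).1) 0
    let avg := PySem.Int.floordiv s (tmp.length : Int)
    if avg ≥ 90 then answer ++ "A"
    else if avg ≥ 80 then answer ++ "B"
    else if avg ≥ 70 then answer ++ "C"
    else if avg ≥ 50 then answer ++ "D"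
    else answer ++ "F") ""

-- ===== PORT B =====
def solution_alt (scores : List (List Int)) : String :=
  let n := scores.length
  let grades := (PySem.List.pyRange 0 ((PySem.List.pyGetD scores 0 []).length : Int) 1).foldl
    (fun gs c =>
      let col := (PySem.List.pyRange 0 (n : Int) 1).map
        (fun r => PySem.List.pyGetD (PySem.List.pyGetD scores r []) c 0)
      let s := col.sum
      let sk : Int × Int :=
        if c < (n : Int) then
          let me := PySem.List.pyGetD col c 0
          if PySem.List.count col me = 1 ∧
             (PySem.List.min? col (fun x => x) = some me ∨
              PySem.List.max? col (fun x => x) = some me) then (s - me, (n : Int) - 1)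
          else (s, (n : Int))
        else (s, (n : Int))
      let avg := PySem.Int.floordiv sk.1 sk.2
      gs ++ [if avg ≥ 90 then "A" else if avg ≥ 80 then "B" else if avg ≥ 70 then "C"
             else if avg ≥ 50 then "D" else "F"]) []
  PySem.Str.join "" grades

-- ===== PRECONDITION & SPEC =====
-- Pre_ excludes exactly the inputs where the Python A raises: empty scores (IndexError on
-- scores[0]), a row shorter than row 0 (IndexError on scores[r][c]), and a single row with
-- nonempty columns (IndexError on tmp[1]).
def Pre_solution (scores : List (List Int)) : Prop :=
  scores ≠ [] ∧ (∀ row ∈ scores, (scores.headD []).length ≤ row.length) ∧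
  ((scores.headD []).length = 0 ∨ 2 ≤ scores.length)
instance (scores : List (List Int)) : Decidable (Pre_solution scores) := by
  unfold Pre_solution; infer_instance
def pvWitness_solution : List (List Int) := [[90, 50], [40, 95]]

def Spec_solution (scores : List (List Int)) (out : String) : Prop := out = solution_alt scores
instance (scores : List (List Int)) (out : String) : Decidable (Spec_solution scores out) := by
  unfold Spec_solution; infer_instance

-- ===== CLAIM (what is proved, stated in full; the proofs are below) =====
def Claim_equal_solution : Prop := ∀ (scores : List (List Int)), Dom_solution scores → Pre_solution scores → Spec_solution scores (solution scores)

-- generic index/count lemmas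
theorem pvTwoLeCount {α : Type} [DecidableEq α] (l : List α) (v : α) (i j : Nat) (hij : i < j)
    (hj : j < l.length) (hi : l[i]'(Nat.lt_trans hij hj) = v) (hjv : l[j]'hj = v) :
    2 ≤ l.count v := by
  have h1 : v ∈ l.take j := by
    refine List.mem_iff_getElem.mpr ⟨i, ?_, ?_⟩
    · simp [List.length_take]; omega
    · simpa [List.getElem_take] using hi
  have h2 : v ∈ l.drop j := by
    refine List.mem_iff_getElem.mpr ⟨0, ?_, ?_⟩
    · simp [List.length_drop]; omega
    · simpa [List.getElem_drop] using hjv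
  have := List.take_append_drop j l
  calc 2 ≤ (l.take j).count v + (l.drop j).count v := by
        have := List.one_le_count_iff.mpr h1
        have := List.one_le_count_iff.mpr h2
        omega
    _ = l.count v := by rw [← List.count_append, List.take_append_drop]

theorem pvCountEqOne {α : Type} [DecidableEq α] (l : List α) (v : α) (j : Nat)
    (hj : j < l.length) (hjv : l[j]'hj = v)
    (h : ∀ (i : Nat) (hi : i < l.length), i ≠ j → l[i]'hi ≠ v) : l.count v = 1 := by
  have hmem : v ∈ l := List.mem_iff_getElem.mpr ⟨j, hj, hjv⟩
  have hge : 1 ≤ l.count v := List.one_le_count_iff.mpr hmem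
  by_contra hne
  have h2 : 2 ≤ l.count v := by omega
  -- from count ≥ 2 extract two distinct indices
  have hdup : l.Duplicate v := List.duplicate_iff_two_le_count.mpr h2
  obtain ⟨i1, i2, hlt, hv1, hv2⟩ := List.duplicate_iff_exists_distinct_get.mp hdup
  have : (i1 : Nat) ≠ j ∨ (i2 : Nat) ≠ j := by
    rcases Nat.lt_or_ge (i1 : Nat) j with h' | h'
    · exact Or.inl (by omega)
    · right; have : (i1:Nat) < (i2:Nat) := hlt; omega
  rcases this with h' | h'
  · exact h i1 i1.isLt h' (by simpa [List.get_eq_getElem] using hv1.symm)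
  · exact h i2 i2.isLt h' (by simpa [List.get_eq_getElem] using hv2.symm)
theorem pvMinChar (st : List (Int × Int)) (me c : Int)
    (h2 : 2 ≤ st.length)
    (hmono : ∀ (p q : Nat) (hpq : p ≤ q) (hq : q < st.length),
      (st[p]'(Nat.lt_of_le_of_lt hpq hq)).1 ≤ (st[q]'hq).1)
    (hsnd : ∀ x ∈ st, x.2 = c → x = (me, c))
    (hin : (me, c) ∈ st) :
    ((st[0]'(by omega)).2 = c ∧ (st[0]'(by omega)).1 ≠ (st[1]'(by omega)).1) ↔
      ((st.map (·.1)).count me = 1 ∧ ∀ x ∈ st, me ≤ x.1) := by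
  have h0 : 0 < st.length := by omega
  have h1 : 1 < st.length := by omega
  constructor
  · rintro ⟨ha, hb⟩
    have hst0 : st[0]'h0 = (me, c) := hsnd _ (List.getElem_mem h0) ha
    have hlt : me < (st[1]'h1).1 := by
      have := hmono 0 1 (by omega) h1
      have hne : (st[0]'h0).1 ≠ (st[1]'h1).1 := hb
      rw [hst0] at this hne
      exact lt_of_le_of_ne this hne
    have hgt : ∀ (i : Nat) (hi : i < st.length), i ≠ 0 → me < (st[i]'hi).1 := by
      intro i hi hi0
      exact lt_of_lt_of_le hlt (hmono 1 i (by omega) hi)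
    constructor
    · refine pvCountEqOne _ _ 0 (by simpa using h0) (by simpa using congrArg Prod.fst hst0) ?_
      intro i hi hine
      have hi' : i < st.length := by simpa using hi
      have := hgt i hi' (by simpa using hine)
      simp only [List.getElem_map]
      omega
    · intro x hx
      obtain ⟨i, hi, rfl⟩ := List.mem_iff_getElem.mp hx
      by_cases hi0 : i = 0
      · subst hi0; rw [hst0]
      · exact le_of_lt (hgt i hi hi0)
  · rintro ⟨hcount, hmin⟩
    obtain ⟨j, hj, hjv⟩ := List.mem_iff_getElem.mp hin
    have hst0fst : (st[0]'h0).1 = me := by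
      refine le_antisymm ?_ (hmin _ (List.getElem_mem h0))
      have := hmono 0 j (by omega) hj
      rw [hjv] at this
      exact this
    have hj0 : j = 0 := by
      by_contra hne
      have h2c : 2 ≤ (st.map (·.1)).count me :=
        pvTwoLeCount _ me 0 j (by omega) (by simpa using hj)
          (by simpa using hst0fst) (by simp [hjv])
      omega
    subst hj0
    refine ⟨by rw [hjv], ?_⟩
    intro heq
    have h2c : 2 ≤ (st.map (·.1)).count me :=
      pvTwoLeCount _ me 0 1 (by omega) (by simpa using h1)
        (by simpa using hst0fst) (by simp; omega)
    omega

theorem pvMaxChar (st : List (Int × Int)) (me c : Int)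
    (h2 : 2 ≤ st.length)
    (hmono : ∀ (p q : Nat) (hpq : p ≤ q) (hq : q < st.length),
      (st[p]'(Nat.lt_of_le_of_lt hpq hq)).1 ≤ (st[q]'hq).1)
    (hsnd : ∀ x ∈ st, x.2 = c → x = (me, c))
    (hin : (me, c) ∈ st) :
    ((st[st.length - 1]'(by omega)).2 = c ∧
      (st[st.length - 1]'(by omega)).1 ≠ (st[st.length - 2]'(by omega)).1) ↔
      ((st.map (·.1)).count me = 1 ∧ ∀ x ∈ st, x.1 ≤ me) := by
  have hN1 : st.length - 1 < st.length := by omega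
  have hN2 : st.length - 2 < st.length := by omega
  constructor
  · rintro ⟨ha, hb⟩
    have hlast : st[st.length - 1]'hN1 = (me, c) := hsnd _ (List.getElem_mem hN1) ha
    have hlt : (st[st.length - 2]'hN2).1 < me := by
      have := hmono (st.length - 2) (st.length - 1) (by omega) hN1
      rw [hlast] at this hb
      exact lt_of_le_of_ne this (Ne.symm hb)
    have hgt : ∀ (i : Nat) (hi : i < st.length), i ≠ st.length - 1 → (st[i]'hi).1 < me := by
      intro i hi hi0
      exact lt_of_le_of_lt (hmono i (st.length - 2) (by omega) hN2) hlt
    constructor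
    · refine pvCountEqOne _ _ (st.length - 1) (by simpa using hN1)
        (by simpa using congrArg Prod.fst hlast) ?_
      intro i hi hine
      have hi' : i < st.length := by simpa using hi
      have := hgt i hi' (by simpa using hine)
      simp only [List.getElem_map]
      omega
    · intro x hx
      obtain ⟨i, hi, rfl⟩ := List.mem_iff_getElem.mp hx
      by_cases hi0 : i = st.length - 1
      · subst hi0; rw [hlast]
      · exact le_of_lt (hgt i hi hi0)
  · rintro ⟨hcount, hmax⟩
    obtain ⟨j, hj, hjv⟩ := List.mem_iff_getElem.mp hin
    have hlastfst : (st[st.length - 1]'hN1).1 = me := by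
      refine le_antisymm (hmax _ (List.getElem_mem hN1)) ?_
      have := hmono j (st.length - 1) (by omega) hN1
      rw [hjv] at this
      exact this
    have hj0 : j = st.length - 1 := by
      by_contra hne
      have hjlt : j < st.length - 1 := by omega
      have h2c : 2 ≤ (st.map (·.1)).count me :=
        pvTwoLeCount _ me j (st.length - 1) (by omega) (by simpa using hN1)
          (by simp [hjv]) (by simpa using hlastfst)
      omega
    subst hj0
    refine ⟨by rw [hjv], ?_⟩
    intro heq
    have h2c : 2 ≤ (st.map (·.1)).count me :=
      pvTwoLeCount _ me (st.length - 2) (st.length - 1) (by omega) (by simpa using hN1)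
        (by simp; omega) (by simpa using hlastfst)
    omega
-- proof-side helper definitions (mirror B's per-column computation)
def pvGrade (avg : Int) : String :=
  if avg ≥ 90 then "A" else if avg ≥ 80 then "B" else if avg ≥ 70 then "C"
  else if avg ≥ 50 then "D" else "F"

def pvCol (scores : List (List Int)) (c : Int) : List Int :=
  (PySem.List.pyRange 0 (scores.length : Int) 1).map
    (fun r => PySem.List.pyGetD (PySem.List.pyGetD scores r []) c 0)

def pvSK (scores : List (List Int)) (c : Int) : Int × Int :=
  let n := scores.length
  let col := pvCol scores c
  let s := col.sum
  if c < (n : Int) then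
    let me := PySem.List.pyGetD col c 0
    if PySem.List.count col me = 1 ∧
       (PySem.List.min? col (fun x => x) = some me ∨
        PySem.List.max? col (fun x => x) = some me) then (s - me, (n : Int) - 1)
    else (s, (n : Int))
  else (s, (n : Int))

def pvG (scores : List (List Int)) (c : Int) : String :=
  pvGrade (PySem.Int.floordiv (pvSK scores c).1 (pvSK scores c).2)

theorem pvMinIff (col : List Int) (me : Int) (hme : me ∈ col) :
    (PySem.List.min? col (fun x => x) = some me) ↔ (∀ x ∈ col, me ≤ x) := by
  constructor
  · intro h x hx; exact PySem.List.min?_isMin h x hx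
  · intro h
    cases hmin : PySem.List.min? col (fun x => x) with
    | none =>
        rw [PySem.List.min?_eq_none_iff] at hmin
        subst hmin; cases hme
    | some m =>
        have hm : m ∈ col := PySem.List.min?_mem hmin
        have h1 : m ≤ me := PySem.List.min?_isMin hmin me hme
        have h2 : me ≤ m := h m hm
        rw [le_antisymm h1 h2]

theorem pvMaxIff (col : List Int) (me : Int) (hme : me ∈ col) :
    (PySem.List.max? col (fun x => x) = some me) ↔ (∀ x ∈ col, x ≤ me) := by
  constructor
  · intro h x hx; exact PySem.List.max?_isMax h x hx
  · intro h
    cases hmax : PySem.List.max? col (fun x => x) with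
    | none =>
        rw [PySem.List.max?_eq_none_iff] at hmax
        subst hmax; cases hme
    | some m =>
        have hm : m ∈ col := PySem.List.max?_mem hmax
        have h1 : me ≤ m := PySem.List.max?_isMax hmax me hme
        have h2 : m ≤ me := h m hm
        rw [le_antisymm h2 h1]


theorem pvSK_of_not_lt (scores : List (List Int)) (c : Int) (h : ¬ c < (scores.length : Int)) :
    pvSK scores c = ((pvCol scores c).sum, (scores.length : Int)) := by
  simp only [pvSK, if_neg h]

theorem pvSK_of_pos (scores : List (List Int)) (c : Int) (h : c < (scores.length : Int))
    (hq : PySem.List.count (pvCol scores c) (PySem.List.pyGetD (pvCol scores c) c 0) = 1 ∧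
      (PySem.List.min? (pvCol scores c) (fun x => x) =
         some (PySem.List.pyGetD (pvCol scores c) c 0) ∨
       PySem.List.max? (pvCol scores c) (fun x => x) =
         some (PySem.List.pyGetD (pvCol scores c) c 0))) :
    pvSK scores c = ((pvCol scores c).sum - PySem.List.pyGetD (pvCol scores c) c 0,
      (scores.length : Int) - 1) := by
  simp only [pvSK, if_pos h, if_pos hq]

theorem pvSK_of_neg (scores : List (List Int)) (c : Int) (h : c < (scores.length : Int))
    (hq : ¬ (PySem.List.count (pvCol scores c) (PySem.List.pyGetD (pvCol scores c) c 0) = 1 ∧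
      (PySem.List.min? (pvCol scores c) (fun x => x) =
         some (PySem.List.pyGetD (pvCol scores c) c 0) ∨
       PySem.List.max? (pvCol scores c) (fun x => x) =
         some (PySem.List.pyGetD (pvCol scores c) c 0)))) :
    pvSK scores c = ((pvCol scores c).sum, (scores.length : Int)) := by
  simp only [pvSK, if_pos h, if_neg hq]

-- the per-column heart: A's sorted-and-pop pair (sum of kept scores, kept length) equals B's pvSK
theorem pvKey (scores : List (List Int)) (h2 : 2 ≤ scores.length) (c : Int) (hc0 : 0 ≤ c)
    (tmp tmp' : List (Int × Int))
    (htmp : tmp = PySem.List.sorted ((PySem.List.pyRange 0 (scores.length : Int) 1).map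
        (fun r => (PySem.List.pyGetD (PySem.List.pyGetD scores r []) c 0, r))) (fun x => x.1) false)
    (htmp' : tmp' = if (PySem.List.pyGetD tmp 0 (0, 0)).2 = c ∧
         (PySem.List.pyGetD tmp 0 (0, 0)).1 ≠ (PySem.List.pyGetD tmp 1 (0, 0)).1 then
         (match PySem.List.pop? tmp 0 with | some (_, rest) => rest | none => tmp)
       else if (PySem.List.pyGetD tmp (-1) (0, 0)).2 = c ∧
           (PySem.List.pyGetD tmp (-1) (0, 0)).1 ≠ (PySem.List.pyGetD tmp (-2) (0, 0)).1 then
         (match PySem.List.pop? tmp (-1) with | some (_, rest) => rest | none => tmp)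
       else tmp) :
    ((tmp'.map (·.1)).sum, (tmp'.length : Int)) = pvSK scores c := by
  set f : Int → Int := fun r => PySem.List.pyGetD (PySem.List.pyGetD scores r []) c 0 with hf
  have hcol : pvCol scores c = (PySem.List.pyRange 0 (scores.length : Int) 1).map f := rfl
  have hperm : tmp.Perm ((PySem.List.pyRange 0 (scores.length : Int) 1).map (fun r => (f r, r))) := by
    rw [htmp]; exact PySem.List.sorted_perm _ _ _
  have hlen : tmp.length = scores.length := by
    rw [htmp, PySem.List.length_sorted, List.length_map, PySem.List.length_pyRange_one]
    omega
  have hlen2 : 2 ≤ tmp.length := by omega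
  have hmemtmp : ∀ x ∈ tmp, ∃ r : Int, 0 ≤ r ∧ r < (scores.length : Int) ∧ x = (f r, r) := by
    intro x hx
    have := hperm.mem_iff.mp hx
    obtain ⟨r, hr, rfl⟩ := List.mem_map.mp this
    exact ⟨r, (PySem.List.mem_pyRange_one.mp hr).1, (PySem.List.mem_pyRange_one.mp hr).2, rfl⟩
  have hpermfst : (tmp.map (·.1)).Perm (pvCol scores c) := by
    rw [hcol]
    have := hperm.map (·.1)
    simpa [List.map_map, Function.comp] using this
  have hsum : (tmp.map (·.1)).sum = (pvCol scores c).sum := hpermfst.sum_eq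
  have hcnt : ∀ v : Int, (tmp.map (·.1)).count v = (pvCol scores c).count v := fun v =>
    hpermfst.count_eq v
  have hmono : ∀ (p q : Nat) (hpq : p ≤ q) (hq : q < tmp.length),
      (tmp[p]'(Nat.lt_of_le_of_lt hpq hq)).1 ≤ (tmp[q]'hq).1 := by
    subst htmp
    intro p q hpq hq
    exact PySem.List.key_sorted_getElem_mono _ (fun x : Int × Int => x.1) hpq hq
  have h0lt : 0 < tmp.length := by omega
  have h1lt : 1 < tmp.length := by omega
  have hne : tmp ≠ [] := by
    intro h
    rw [h] at hlen2
    simp at hlen2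
  have hg0 : PySem.List.pyGetD tmp 0 (0, 0) = tmp[0]'h0lt := by
    rw [PySem.List.pyGetD_zero, List.getD_eq_getElem _ _ h0lt]
  have hg1 : PySem.List.pyGetD tmp 1 (0, 0) = tmp[1]'h1lt := by
    rw [PySem.List.pyGetD_ofNat', List.getD_eq_getElem _ _ h1lt]
  have hgm1 : PySem.List.pyGetD tmp (-1) (0, 0) = tmp[tmp.length - 1]'(by omega) :=
    PySem.List.pyGetD_neg_ofNat tmp 1 (0, 0) (by omega) (by omega)
  have hgm2 : PySem.List.pyGetD tmp (-2) (0, 0) = tmp[tmp.length - 2]'(by omega) :=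
    PySem.List.pyGetD_neg_ofNat tmp 2 (0, 0) (by omega) (by omega)
  by_cases hcn : c < (scores.length : Int)
  case neg =>
    -- no self-score in this column: both sides keep everything
    have hA1 : (PySem.List.pyGetD tmp 0 (0, 0)).2 ≠ c := by
      rw [hg0]
      obtain ⟨r, hr0, hrn, hx⟩ := hmemtmp _ (List.getElem_mem h0lt)
      rw [hx]; intro h; exact hcn (by omega)
    have hA2 : (PySem.List.pyGetD tmp (-1) (0, 0)).2 ≠ c := by
      rw [hgm1]
      obtain ⟨r, hr0, hrn, hx⟩ :=
        hmemtmp _ (List.getElem_mem (show tmp.length - 1 < tmp.length by omega))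
      rw [hx]; intro h; exact hcn (by omega)
    have htmp'2 : tmp' = tmp := by
      rw [htmp', if_neg (by intro h; exact hA1 h.1), if_neg (by intro h; exact hA2 h.1)]
    rw [htmp'2, pvSK_of_not_lt scores c hcn]
    exact Prod.ext (by simpa using hsum) (by rw [hlen])
  case pos =>
    set me : Int := PySem.List.pyGetD (pvCol scores c) c 0 with hme
    have hmef : me = f c := by
      rw [hme, hcol]
      exact PySem.List.pyGetD_map_pyRange_of_nonneg f (scores.length : Int) c 0 hc0 hcn
    have hcmem : c ∈ PySem.List.pyRange 0 (scores.length : Int) 1 :=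
      PySem.List.mem_pyRange_one.mpr ⟨hc0, hcn⟩
    have hin : (me, c) ∈ tmp := by
      rw [hmef]
      exact hperm.mem_iff.mpr (List.mem_map.mpr ⟨c, hcmem, rfl⟩)
    have hmecol : me ∈ pvCol scores c := by
      rw [hmef, hcol]; exact List.mem_map.mpr ⟨c, hcmem, rfl⟩
    have hsnd : ∀ x ∈ tmp, x.2 = c → x = (me, c) := by
      intro x hx hxc
      obtain ⟨r, hr0, hrn, rfl⟩ := hmemtmp x hx
      simp only at hxc
      rw [hxc, hmef]
    have hminchar := pvMinChar tmp me c hlen2 hmono hsnd hin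
    have hmaxchar := pvMaxChar tmp me c hlen2 hmono hsnd hin
    have hboundmin : (∀ x ∈ tmp, me ≤ x.1) ↔ (∀ v ∈ pvCol scores c, me ≤ v) := by
      constructor
      · intro h v hv
        have : v ∈ tmp.map (·.1) := hpermfst.mem_iff.mpr hv
        obtain ⟨x, hx, rfl⟩ := List.mem_map.mp this
        exact h x hx
      · intro h x hx
        exact h x.1 (hpermfst.mem_iff.mp (List.mem_map.mpr ⟨x, hx, rfl⟩))
    have hboundmax : (∀ x ∈ tmp, x.1 ≤ me) ↔ (∀ v ∈ pvCol scores c, v ≤ me) := by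
      constructor
      · intro h v hv
        have : v ∈ tmp.map (·.1) := hpermfst.mem_iff.mpr hv
        obtain ⟨x, hx, rfl⟩ := List.mem_map.mp this
        exact h x hx
      · intro h x hx
        exact h x.1 (hpermfst.mem_iff.mp (List.mem_map.mpr ⟨x, hx, rfl⟩))
    have hcount1 : ((tmp.map (·.1)).count me = 1) ↔ (PySem.List.count (pvCol scores c) me = 1) := by
      rw [PySem.List.count_eq, hcnt]
    have hBmin : ((PySem.List.pyGetD tmp 0 (0, 0)).2 = c ∧
        (PySem.List.pyGetD tmp 0 (0, 0)).1 ≠ (PySem.List.pyGetD tmp 1 (0, 0)).1) ↔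
        (PySem.List.count (pvCol scores c) me = 1 ∧
         PySem.List.min? (pvCol scores c) (fun x => x) = some me) := by
      rw [hg0, hg1, hminchar, hcount1, pvMinIff _ _ hmecol, hboundmin]
    have hBmax : ((PySem.List.pyGetD tmp (-1) (0, 0)).2 = c ∧
        (PySem.List.pyGetD tmp (-1) (0, 0)).1 ≠ (PySem.List.pyGetD tmp (-2) (0, 0)).1) ↔
        (PySem.List.count (pvCol scores c) me = 1 ∧
         PySem.List.max? (pvCol scores c) (fun x => x) = some me) := by
      rw [hgm1, hgm2, hmaxchar, hcount1, pvMaxIff _ _ hmecol, hboundmax]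
    by_cases hA1 : (PySem.List.pyGetD tmp 0 (0, 0)).2 = c ∧
        (PySem.List.pyGetD tmp 0 (0, 0)).1 ≠ (PySem.List.pyGetD tmp 1 (0, 0)).1
    · -- unique self minimum: A pops the head, B subtracts the self-score
      obtain ⟨hc1, hminb⟩ := hBmin.mp hA1
      obtain ⟨a, rest, hcons⟩ : ∃ a rest, tmp = a :: rest := by
        cases tmp with
        | nil => simp at h0lt
        | cons a rest => exact ⟨a, rest, rfl⟩
      have ha : a = (me, c) := by
        apply hsnd a (by rw [hcons]; exact List.mem_cons_self ..)
        have h := hA1.1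
        rw [hcons, PySem.List.pyGetD_zero_cons] at h
        exact h
      have htmp'2 : tmp' = rest := by
        rw [htmp', if_pos hA1, hcons, PySem.List.pop?_zero_cons]
      have hsumrest : (rest.map (·.1)).sum = (pvCol scores c).sum - me := by
        have h := hsum
        rw [hcons, ha] at h
        simp at h
        omega
      have hlenrest : rest.length = scores.length - 1 := by
        rw [hcons] at hlen
        simp at hlen
        omega
      rw [htmp'2, pvSK_of_pos scores c hcn ⟨hc1, Or.inl hminb⟩]
      refine Prod.ext (by simpa using hsumrest) ?_
      show ((rest.length : Nat) : Int) = (scores.length : Int) - 1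
      rw [hlenrest]
      omega
    · by_cases hA2 : (PySem.List.pyGetD tmp (-1) (0, 0)).2 = c ∧
          (PySem.List.pyGetD tmp (-1) (0, 0)).1 ≠ (PySem.List.pyGetD tmp (-2) (0, 0)).1
      · -- unique self maximum: A pops the last element, B subtracts the self-score
        obtain ⟨hc1, hmaxb⟩ := hBmax.mp hA2
        have hlast : tmp.getLast hne = (me, c) := by
          rw [List.getLast_eq_getElem]
          apply hsnd _ (List.getElem_mem _)
          have h := hA2.1
          rw [hgm1] at h
          exact h
        have hdec : tmp.dropLast ++ [tmp.getLast hne] = tmp := List.dropLast_append_getLast hne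
        have hpop : PySem.List.pop? tmp (-1) = some (tmp.getLast hne, tmp.dropLast) := by
          conv_lhs => rw [← hdec]
          exact PySem.List.pop?_last _ _
        have htmp'2 : tmp' = tmp.dropLast := by
          rw [htmp', if_neg hA1, if_pos hA2, hpop]
        have hsumdrop : (tmp.dropLast.map (·.1)).sum = (pvCol scores c).sum - me := by
          have h : (tmp.dropLast.map (·.1)).sum + me = (pvCol scores c).sum := by
            calc (tmp.dropLast.map (·.1)).sum + me
                = ((tmp.dropLast ++ [tmp.getLast hne]).map (·.1)).sum := by
                  rw [List.map_append]
                  simp [hlast]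
              _ = (tmp.map (·.1)).sum := by rw [hdec]
              _ = (pvCol scores c).sum := hsum
          omega
        have hlendrop : tmp.dropLast.length = scores.length - 1 := by
          rw [List.length_dropLast, hlen]
        rw [htmp'2, pvSK_of_pos scores c hcn ⟨hc1, Or.inr hmaxb⟩]
        refine Prod.ext (by simpa using hsumdrop) ?_
        show ((tmp.dropLast.length : Nat) : Int) = (scores.length : Int) - 1
        rw [hlendrop]
        omega
      · -- nothing dropped on either side
        have htmp'2 : tmp' = tmp := by rw [htmp', if_neg hA1, if_neg hA2]
        have hQ : ¬ (PySem.List.count (pvCol scores c) me = 1 ∧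
            (PySem.List.min? (pvCol scores c) (fun x => x) = some me ∨
             PySem.List.max? (pvCol scores c) (fun x => x) = some me)) := by
          rintro ⟨hc1, hmm | hmm⟩
          · exact hA1 (hBmin.mpr ⟨hc1, hmm⟩)
          · exact hA2 (hBmax.mpr ⟨hc1, hmm⟩)
        rw [htmp'2, pvSK_of_neg scores c hcn hQ]
        exact Prod.ext (by simpa using hsum) (by rw [hlen])
-- String.join "" bookkeeping
theorem pvInterNil : ∀ (l : List (List Char)), List.intercalate ([] : List Char) l = l.flatten
  | [] => by simp [List.intercalate]
  | [a] => by simp [List.intercalate]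
  | a :: b :: t => by
    have := pvInterNil (b :: t)
    simp [List.intercalate] at this ⊢
    simpa using this

theorem pvJoinNil : PySem.Str.join "" [] = "" := rfl

theorem pvJoinSnoc (gs : List String) (x : String) :
    PySem.Str.join "" (gs ++ [x]) = PySem.Str.join "" gs ++ x := by
  simp only [PySem.Str.join, PySem.Chars.join, String.toList_empty, pvInterNil, List.map_append,
    List.map_cons, List.map_nil, List.flatten_append, List.flatten_cons, List.flatten_nil,
    List.append_nil, String.ofList_append, String.ofList_toList]

theorem pvFoldlStrcat {α : Type} (l : List α) (f : α → String) :
    ∀ acc : String, l.foldl (fun a x => a ++ f x) acc = acc ++ PySem.Str.join "" (l.map f) := by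
  induction l with
  | nil => intro acc; simp [pvJoinNil]
  | cons x t ih =>
      intro acc
      have hjoin : PySem.Str.join "" (f x :: t.map f) = f x ++ PySem.Str.join "" (t.map f) := by
        have := pvJoinSnoc [] (f x)
        simp only [PySem.Str.join, PySem.Chars.join, String.toList_empty, pvInterNil,
          List.map_cons, List.flatten_cons, String.ofList_append, String.ofList_toList]
      simp only [List.foldl_cons, List.map_cons, hjoin, ih (acc ++ f x), String.append_assoc]

-- B's output in closed form
theorem pvB_repr (scores : List (List Int)) :
    solution_alt scores = PySem.Str.join ""
      ((PySem.List.pyRange 0 ((PySem.List.pyGetD scores 0 []).length : Int) 1).map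
        (pvG scores)) := by
  have hstep : solution_alt scores = PySem.Str.join ""
      ((PySem.List.pyRange 0 ((PySem.List.pyGetD scores 0 []).length : Int) 1).foldl
        (fun gs c => gs ++ [pvG scores c]) []) := rfl
  rw [hstep, PySem.List.foldl_append_singleton_eq_map, List.nil_append]

-- A's per-column step rewritten into B's closed form
theorem pvA_repr (scores : List (List Int)) (h2 : 2 ≤ scores.length) :
    solution scores = (PySem.List.pyRange 0 ((PySem.List.pyGetD scores 0 []).length : Int) 1).foldl
      (fun a c => a ++ pvG scores c) "" := by
  unfold solution
  apply PySem.List.foldl_congr_mem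
  intro answer c hc
  have hc0 : (0 : Int) ≤ c := (PySem.List.mem_pyRange_one.mp hc).1
  simp only []
  rw [PySem.List.foldl_append_singleton_eq_map, List.nil_append]
  set T := PySem.List.sorted ((PySem.List.pyRange 0 (scores.length : Int) 1).map
      (fun r => (PySem.List.pyGetD (PySem.List.pyGetD scores r []) c 0, r))) (fun x => x.1) false
    with hT
  set T' := if (PySem.List.pyGetD T 0 (0, 0)).2 = c ∧
       (PySem.List.pyGetD T 0 (0, 0)).1 ≠ (PySem.List.pyGetD T 1 (0, 0)).1 then
       (match PySem.List.pop? T 0 with | some (_, rest) => rest | none => T)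
     else if (PySem.List.pyGetD T (-1) (0, 0)).2 = c ∧
         (PySem.List.pyGetD T (-1) (0, 0)).1 ≠ (PySem.List.pyGetD T (-2) (0, 0)).1 then
       (match PySem.List.pop? T (-1) with | some (_, rest) => rest | none => T)
     else T
    with hT'
  have hkey := pvKey scores h2 c hc0 T T' hT hT'
  rw [PySem.List.foldl_pyRange_zero_pyGetD' T' (0, 0) (fun acc (x : Int × Int) => acc + x.1) 0,
    PySem.List.foldl_add T' (fun x : Int × Int => x.1) 0]
  have h1 : (T'.map (fun x : Int × Int => x.1)).sum = (pvSK scores c).1 := congrArg Prod.fst hkey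
  have h2' : ((T'.length : Nat) : Int) = (pvSK scores c).2 := congrArg Prod.snd hkey
  rw [h1, h2', zero_add]
  show (if PySem.Int.floordiv (pvSK scores c).1 (pvSK scores c).2 ≥ 90 then answer ++ "A"
    else if _ ≥ 80 then answer ++ "B" else if _ ≥ 70 then answer ++ "C"
    else if _ ≥ 50 then answer ++ "D" else answer ++ "F") = answer ++ pvG scores c
  unfold pvG pvGrade
  split_ifs <;> rfl

-- ===== VERDICT (by name: the statement is the Claim_ definition above) =====
theorem solution_spec : Claim_equal_solution := by
  intro scores _hdom hpre
  unfold Spec_solution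
  obtain ⟨hne, _hrows, hdisj⟩ := hpre
  have hhead : PySem.List.pyGetD scores 0 [] = scores.headD [] := by
    rw [PySem.List.pyGetD_zero]
    cases scores <;> simp
  by_cases hcols : (PySem.List.pyGetD scores 0 []).length = 0
  · have hR : PySem.List.pyRange 0 ((PySem.List.pyGetD scores 0 []).length : Int) 1 = [] := by
      rw [hcols]
      exact PySem.List.pyRange_one_eq_nil (by omega)
    unfold solution solution_alt
    rw [hR]
    rfl
  · have h2 : 2 ≤ scores.length := by
      rcases hdisj with h | h
      · exact absurd (by rw [hhead]; exact h) hcols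
      · exact h
    rw [pvA_repr scores h2, pvB_repr scores,
      pvFoldlStrcat _ (pvG scores) ""]
    rw [String.empty_append]
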